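-- pv_equiv track=rewrite | github.com/yuuforest/Personal-Project | python/PCCP 모의고사 1회/유전법칙.py | find
-- ===== SOURCE A (Python) =====
-- def find(generation, order):
--
--     stack = []
--     while generation > 1:
--         generation -= 1
--         stack.append(order % 4)
--         order //= 4
--
--     while stack:
--         temp = stack.pop()
--         if temp == 0:
--             return "RR"
--         if temp == 3:
--             return "rr"
--
--     return "Rr"
-- ===== SOURCE B (Python) =====
-- def find(generation, order):
--     # Single forward pass over base-4 digits, least significant first, with a
--     # last-write-wins accumulator (a more significant 0/3 digit overwrites the
--     # answer), plus a fixed-point shortcut: once the quotient reaches 0 (or -1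
--     # for negatives) all remaining digits are 0 (or 3), so the answer is known.
--     n = generation - 1
--     ans = "Rr"
--     q = order
--     while n > 0:
--         if q == 0:
--             return "RR"
--         if q == -1:
--             return "rr"
--         d = q % 4
--         if d == 0:
--             ans = "RR"
--         elif d == 3:
--             ans = "rr"
--         q //= 4
--         n -= 1
--     return ans
-- ===== Notes on version B (the rewrite author's own statement) =====
-- stated objective: faster
-- what changed: B replaces A's two staged passes (build a digit stack over generation-1 iterations, then pop it scanning most-significant-first with early returns) by a single forward least-significant-first pass with a last-write-wins accumulator and a fixed-point shortcut (quotient 0 -> RR, quotient -1 -> rr), stopping after O(log|order|) steps.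
import Mathlib
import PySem

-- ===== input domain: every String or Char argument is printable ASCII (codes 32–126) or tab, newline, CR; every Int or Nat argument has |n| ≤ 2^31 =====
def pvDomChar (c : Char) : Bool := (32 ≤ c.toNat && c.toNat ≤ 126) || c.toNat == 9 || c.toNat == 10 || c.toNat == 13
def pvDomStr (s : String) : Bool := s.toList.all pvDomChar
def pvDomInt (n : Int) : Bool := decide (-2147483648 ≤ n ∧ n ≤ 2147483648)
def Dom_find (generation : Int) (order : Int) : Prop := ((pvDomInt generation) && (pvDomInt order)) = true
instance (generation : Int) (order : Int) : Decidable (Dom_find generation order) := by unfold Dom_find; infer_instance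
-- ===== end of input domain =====

-- B is a single least-significant-first pass with a last-write-wins accumulator and a
-- fixed-point shortcut, instead of A's build-a-stack pass followed by a pop-and-scan pass.

-- ===== PORT A =====
-- the Python stack is modeled most-recent-element FIRST, so that stack.append(x)
-- is `x :: stack` and stack.pop() takes the head — the O(1) list encoding of a stack
-- first while-loop: push order % 4, divide order by 4, generation-1 times
def findLoopA (generation : Int) (order : Int) (stack : List Int) : List Int :=
  if generation > 1 then
    findLoopA (generation - 1) (PySem.Int.floordiv order 4) (PySem.Int.mod order 4 :: stack)
  else stack
termination_by generation.toNat
decreasing_by omega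

-- second while-loop: pop (= take the head, most recent first) until a 0 or 3 is found
def findScanA (stack : List Int) : String :=
  match stack with
  | [] => "Rr"
  | temp :: rest =>
    if temp = 0 then "RR"
    else if temp = 3 then "rr"
    else findScanA rest

def find (generation : Int) (order : Int) : String :=
  findScanA (findLoopA generation order [])

-- ===== PORT B =====
-- Source B's single while-loop: n counts down, q is the running quotient, ans the accumulator
def findLoopB (n : Int) (q : Int) (ans : String) : String :=
  if n > 0 then
    if q = 0 then "RR"
    else if q = -1 then "rr"
    else
      let d := PySem.Int.mod q 4
      findLoopB (n - 1) (PySem.Int.floordiv q 4)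
        (if d = 0 then "RR" else if d = 3 then "rr" else ans)
  else ans
termination_by n.toNat
decreasing_by omega

def find_alt (generation : Int) (order : Int) : String :=
  findLoopB (generation - 1) order "Rr"

-- ===== PRECONDITION & SPEC =====
def Spec_find (generation : Int) (order : Int) (out : String) : Prop := out = find_alt generation order
instance (generation : Int) (order : Int) (out : String) : Decidable (Spec_find generation order out) := by unfold Spec_find; infer_instance

-- ===== CLAIM (what is proved, stated in full; the proofs are below) =====
def Claim_equal_find : Prop := ∀ (generation : Int) (order : Int), Dom_find generation order → Spec_find generation order (find generation order)

-- ===== LEMMAS AND PROOFS =====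

-- the first n base-4 digits of o, least significant first
def digN : Nat → Int → List Int
  | 0, _ => []
  | n + 1, o => PySem.Int.mod o 4 :: digN n (PySem.Int.floordiv o 4)

-- first 0/3 decision in a most-significant-first list
def firstHit : List Int → Option String
  | [] => none
  | d :: rest => if d = 0 then some "RR" else if d = 3 then some "rr" else firstHit rest

-- last-write-wins fold over a least-significant-first list
def foldLSB (l : List Int) (ans : String) : String :=
  l.foldl (fun a d => if d = 0 then "RR" else if d = 3 then "rr" else a) ans

theorem findLoopA_eq (n : Nat) : ∀ (g o : Int) (stack : List Int), (g - 1).toNat = n →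
    findLoopA g o stack = (digN n o).reverse ++ stack := by
  induction n with
  | zero =>
    intro g o stack h
    rw [findLoopA]
    simp [digN, if_neg (by omega : ¬ g > 1)]
  | succ n ih =>
    intro g o stack h
    rw [findLoopA, if_pos (by omega : g > 1), ih _ _ _ (by omega)]
    simp [digN]

theorem findScanA_eq_firstHit (l : List Int) : findScanA l = (firstHit l).getD "Rr" := by
  induction l with
  | nil => rfl
  | cons d rest ih => rw [findScanA, firstHit]; split_ifs <;> simp_all

theorem foldLSB_eq_firstHit (m : List Int) : ∀ ans, foldLSB m.reverse ans = (firstHit m).getD ans := by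
  induction m with
  | nil => intro ans; rfl
  | cons d rest ih =>
    intro ans
    rw [List.reverse_cons, foldLSB, List.foldl_append]
    have := ih ans
    rw [foldLSB] at this
    rw [this, firstHit]
    split_ifs <;> simp_all

theorem digN_zero (m : Nat) : digN m 0 = List.replicate m 0 := by
  induction m with
  | zero => rfl
  | succ m ih =>
    rw [digN]
    have h0 : PySem.Int.mod (0 : Int) 4 = 0 := by decide
    have hf : PySem.Int.floordiv (0 : Int) 4 = 0 := by decide
    rw [h0, hf, ih, List.replicate_succ]

theorem digN_negone (m : Nat) : digN m (-1) = List.replicate m 3 := by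
  induction m with
  | zero => rfl
  | succ m ih =>
    rw [digN]
    have h0 : PySem.Int.mod (-1 : Int) 4 = 3 := by decide
    have hf : PySem.Int.floordiv (-1 : Int) 4 = -1 := by decide
    rw [h0, hf, ih, List.replicate_succ]

theorem foldLSB_replicate0 (m : Nat) : ∀ ans, foldLSB (List.replicate (m + 1) 0) ans = "RR" := by
  induction m with
  | zero => intro ans; rfl
  | succ m ih =>
    intro ans
    rw [List.replicate_succ]
    show foldLSB (List.replicate (m + 1) 0) "RR" = "RR"
    exact ih "RR"

theorem foldLSB_replicate3 (m : Nat) : ∀ ans, foldLSB (List.replicate (m + 1) 3) ans = "rr" := by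
  induction m with
  | zero => intro ans; rfl
  | succ m ih =>
    intro ans
    rw [List.replicate_succ]
    show foldLSB (List.replicate (m + 1) 3) "rr" = "rr"
    exact ih "rr"

theorem findLoopB_eq (m : Nat) : ∀ (n q : Int) (ans : String), n.toNat = m →
    findLoopB n q ans = foldLSB (digN m q) ans := by
  induction m with
  | zero =>
    intro n q ans h
    rw [findLoopB, if_neg (by omega : ¬ n > 0)]
    rfl
  | succ m ih =>
    intro n q ans h
    rw [findLoopB, if_pos (by omega : n > 0)]
    by_cases hq0 : q = 0
    · subst hq0
      rw [if_pos rfl, digN_zero, foldLSB_replicate0]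
    · rw [if_neg hq0]
      by_cases hq1 : q = -1
      · subst hq1
        rw [if_pos rfl, digN_negone, foldLSB_replicate3]
      · rw [if_neg hq1, ih _ _ _ (by omega)]
        rw [digN]
        rfl

-- ===== VERDICT (by name: the statement is the Claim_ definition above) =====
theorem find_spec : Claim_equal_find := by
  intro g o _
  unfold Spec_find find find_alt
  set m : Nat := (g - 1).toNat with hm
  rw [findLoopA_eq m g o [] rfl, List.append_nil, findScanA_eq_firstHit,
      findLoopB_eq m (g - 1) o "Rr" rfl]
  have := foldLSB_eq_firstHit ((digN m o).reverse) "Rr"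
  simpa using this.symm
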